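-- pv_equiv track=rewrite | github.com/qe-team/marmot | marmot/features/source_word2vec_feature_extractor.py | left_context
-- ===== SOURCE A (Python) =====
-- def left_context(token_list, token, context_size, idx):
--     left_window = []
--     if idx <= 0:
--         return ['_START_' for i in range(context_size)]
--     assert(token_list[idx] == token)
--     for i in range(idx-context_size, idx):
--         if i < 0:
--             left_window.append('_START_')
--         else:
--             left_window.append(token_list[i])
--     return left_window
-- ===== SOURCE B (Python) =====
-- def left_context(token_list, token, context_size, idx):
--     if idx <= 0:
--         return ['_START_'] * context_size
--     assert(token_list[idx] == token)
--     real = token_list[max(0, idx - context_size):idx]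
--     return ['_START_'] * (context_size - len(real)) + real
-- ===== Notes on version B (the rewrite author's own statement) =====
-- stated objective: simpler
-- what changed: replaces the per-index loop with its per-element 'i < 0' boundary test by a single slice of the real tokens plus a computed front padding of '_START_' markers
import Mathlib
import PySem

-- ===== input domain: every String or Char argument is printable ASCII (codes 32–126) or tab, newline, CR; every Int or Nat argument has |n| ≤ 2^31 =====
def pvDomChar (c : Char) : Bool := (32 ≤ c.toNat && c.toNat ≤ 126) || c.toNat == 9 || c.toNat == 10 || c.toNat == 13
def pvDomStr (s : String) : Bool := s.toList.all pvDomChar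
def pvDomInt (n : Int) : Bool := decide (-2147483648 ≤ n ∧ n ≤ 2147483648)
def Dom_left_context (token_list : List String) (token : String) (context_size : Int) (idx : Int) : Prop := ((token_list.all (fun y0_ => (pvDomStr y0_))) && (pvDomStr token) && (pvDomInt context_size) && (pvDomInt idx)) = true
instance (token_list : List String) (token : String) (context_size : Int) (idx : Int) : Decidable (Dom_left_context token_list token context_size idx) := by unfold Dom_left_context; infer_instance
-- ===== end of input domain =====

-- B replaces A's per-index loop (with its 'i < 0' test) by one slice of the real
-- tokens plus a computed front pad of '_START_' markers; objective: simpler.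

-- ===== PORT A =====
-- literal port of A: guard, then the per-index loop appending '_START_' or token_list[i]
def left_context (token_list : List String) (token : String) (context_size : Int) (idx : Int) : List String :=
  if idx ≤ 0 then
    (PySem.List.pyRange 0 context_size 1).map (fun _ => "_START_")
  else
    -- assert token_list[idx] == token : guaranteed true by Pre_left_context
    (PySem.List.pyRange (idx - context_size) idx 1).foldl
      (fun left_window i =>
        if i < 0 then left_window ++ ["_START_"]
        else left_window ++ [PySem.List.pyGetD token_list i ""]) []

-- ===== PORT B =====
-- literal port of B: guard, then slice + computed front pad
def left_context_alt (token_list : List String) (token : String) (context_size : Int) (idx : Int) : List String :=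
  if idx ≤ 0 then
    PySem.List.pyRepeat ["_START_"] context_size
  else
    -- assert token_list[idx] == token : guaranteed true by Pre_left_context
    let real := PySem.List.slice token_list (some (max 0 (idx - context_size))) (some idx)
    PySem.List.pyRepeat ["_START_"] (context_size - real.length) ++ real

-- ===== PRECONDITION & SPEC =====
-- Pre_ excludes exactly the inputs where A raises: idx > 0 with idx out of range
-- (IndexError on token_list[idx]) or token_list[idx] ≠ token (AssertionError).
def Pre_left_context (token_list : List String) (token : String) (context_size : Int) (idx : Int) : Prop :=
  idx ≤ 0 ∨ (idx < (token_list.length : Int) ∧ PySem.List.pyGet? token_list idx = some token)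
instance (token_list : List String) (token : String) (context_size : Int) (idx : Int) : Decidable (Pre_left_context token_list token context_size idx) := by unfold Pre_left_context; infer_instance

def pvWitness_left_context : List String × String × Int × Int := (["a", "b", "c"], "c", 2, 2)

def Spec_left_context (token_list : List String) (token : String) (context_size : Int) (idx : Int) (out : List String) : Prop := out = left_context_alt token_list token context_size idx
instance (token_list : List String) (token : String) (context_size : Int) (idx : Int) (out : List String) : Decidable (Spec_left_context token_list token context_size idx out) := by unfold Spec_left_context; infer_instance

-- ===== CLAIM (what is proved, stated in full; the proofs are below) =====
def Claim_equal_left_context : Prop := ∀ (token_list : List String) (token : String) (context_size : Int) (idx : Int), Dom_left_context token_list token context_size idx → Pre_left_context token_list token context_size idx → Spec_left_context token_list token context_size idx (left_context token_list token context_size idx)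

-- ===== LEMMAS AND PROOFS =====

-- the '_START_' prefix of A's loop: every index in range(a, m) is negative
lemma map_start_prefix (a m : Int) (hm : m ≤ 0) (xs : List String) :
    (PySem.List.pyRange a m 1).map
      (fun i => if i < 0 then "_START_" else PySem.List.pyGetD xs i "") =
    List.replicate (m - a).toNat "_START_" := by
  rw [List.eq_replicate_iff]
  refine ⟨by simp [PySem.List.length_pyRange_one], ?_⟩
  intro b hb
  rcases List.mem_map.mp hb with ⟨i, hi, rfl⟩
  have := PySem.List.mem_pyRange_one.mp hi
  simp [show i < 0 by omega]

-- the real-token suffix of A's loop: map of token_list[i] over range(m, b) is the slice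
lemma map_get_segment (xs : List String) (m b : Int) (h0 : 0 ≤ m) (hmb : m ≤ b)
    (hb : b ≤ (xs.length : Int)) :
    (PySem.List.pyRange m b 1).map (fun j => PySem.List.pyGetD xs j "") =
    (xs.drop m.toNat).take (b.toNat - m.toNat) := by
  have hsplit := PySem.List.pyRange_one_append m b (PySem.List.len xs) hmb
    (by simp [PySem.List.len_eq]; omega)
  have hall := PySem.List.map_pyGetD_pyRange xs "" h0
  rw [hsplit, List.map_append] at hall
  have hlen : ((PySem.List.pyRange m b 1).map (fun j => PySem.List.pyGetD xs j "")).length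
      = b.toNat - m.toNat := by
    simp [PySem.List.length_pyRange_one]; omega
  rw [← hall, List.take_left' hlen]

-- ===== VERDICT (by name: the statement is the Claim_ definition above) =====
theorem left_context_spec : Claim_equal_left_context := by
  intro token_list token context_size idx _ hpre
  unfold Spec_left_context left_context left_context_alt
  by_cases hidx : idx ≤ 0
  · simp only [hidx, if_true, PySem.List.pyRepeat_singleton, PySem.List.pyRange_one]
    simp [Function.comp_def, List.map_const']
  · rcases hpre with h | ⟨hlen, _⟩
    · omega
    simp only [hidx, if_false]
    rw [show (fun (left_window : List String) (i : Int) =>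
        if i < 0 then left_window ++ ["_START_"]
        else left_window ++ [PySem.List.pyGetD token_list i ""]) =
      (fun left_window i => left_window ++
        [if i < 0 then "_START_" else PySem.List.pyGetD token_list i ""]) from by
        funext acc i; split <;> rfl]
    rw [PySem.List.foldl_append_singleton_eq_map, List.nil_append]
    have h0idx : 0 < idx := by omega
    by_cases hcs : context_size ≤ 0
    · -- empty range on A's side, empty slice and pad on B's side
      rw [PySem.List.pyRange_one_eq_nil (by omega : idx ≤ idx - context_size)]
      rw [PySem.List.slice_toNat token_list (le_max_left _ _) (by omega)]
      have hmax : max 0 (idx - context_size) = idx - context_size := by omega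
      rw [hmax]
      have h0 : idx.toNat - (idx - context_size).toNat = 0 := by omega
      simp [h0, PySem.List.pyRepeat_singleton]
      omega
    · -- split A's range at m = max(0, idx - context_size)
      have hm0 : (0 : Int) ≤ max 0 (idx - context_size) := le_max_left _ _
      have hm1 : idx - context_size ≤ max 0 (idx - context_size) := le_max_right _ _
      have hm2 : max 0 (idx - context_size) ≤ idx := by omega
      rw [PySem.List.pyRange_one_append (idx - context_size) (max 0 (idx - context_size)) idx
            hm1 hm2, List.map_append]
      have hpart1 : (PySem.List.pyRange (idx - context_size) (max 0 (idx - context_size)) 1).map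
          (fun i => if i < 0 then "_START_" else PySem.List.pyGetD token_list i "") =
          List.replicate (max 0 (idx - context_size) - (idx - context_size)).toNat "_START_" := by
        by_cases h0 : 0 ≤ idx - context_size
        · have he : max 0 (idx - context_size) = idx - context_size := by omega
          rw [he, PySem.List.pyRange_one_eq_nil le_rfl]
          simp
        · have he : max 0 (idx - context_size) = 0 := by omega
          rw [he]
          exact map_start_prefix _ _ le_rfl token_list
      have hpart2 : (PySem.List.pyRange (max 0 (idx - context_size)) idx 1).map
          (fun i => if i < 0 then "_START_" else PySem.List.pyGetD token_list i "") =
          (token_list.drop (max 0 (idx - context_size)).toNat).take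
            (idx.toNat - (max 0 (idx - context_size)).toNat) :=
        calc _ = (PySem.List.pyRange (max 0 (idx - context_size)) idx 1).map
              (fun j => PySem.List.pyGetD token_list j "") :=
            List.map_congr_left (fun i hi => by
              have := PySem.List.mem_pyRange_one.mp hi
              simp [show ¬ i < 0 by omega])
          _ = _ := map_get_segment token_list _ idx hm0 hm2 (by omega)
      rw [hpart1, hpart2, PySem.List.slice_toNat token_list hm0 (by omega),
          PySem.List.pyRepeat_singleton]
      have hreal : ((token_list.drop (max 0 (idx - context_size)).toNat).take
          (idx.toNat - (max 0 (idx - context_size)).toNat)).length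
          = idx.toNat - (max 0 (idx - context_size)).toNat := by
        simp; omega
      rw [hreal]
      congr 1
      congr 1
      omega
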